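-- pv_equiv track=rewrite | github.com/aamindehkordi/CUI-Programming-Languages | Projects/playfair/2020_Fall_AliAmin_Playfair.py | everybody_pair_up
-- ===== SOURCE A (Python) =====
-- def everybody_pair_up(plaintext):#Turns the message into lowercase, separates them into groups of two, and inserts an x inbetween two of the same concurrent characters or at the very end to ensure an even length
--     plaintext = plaintext.lower()
--     textAlpha = ''
--     for i in range(len(plaintext)):#formats text
--         if plaintext[i].isalpha():
--             textAlpha += plaintext[i]
--     temp = ''
--     i = 0
--     while i < len(textAlpha):#adds the x
--         ch1 = textAlpha[i]
--         ch2 = textAlpha[i+1] if i+1 < len(textAlpha) else 'x'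
--
--         if ch1 == ch2:
--             ch2 = 'x'
--             i+=1
--         else:
--             i+=2
--         temp += ch1+ch2+' ' #groups of two
--
--     return temp
-- ===== SOURCE B (Python) =====
-- def everybody_pair_up(plaintext):
--     letters = [c for c in plaintext.lower() if c.isalpha()]
--     parts = []
--     pending = ''
--     for c in letters:
--         if not pending:
--             pending = c
--         elif c == pending:
--             parts.append(pending + 'x ')
--             pending = c
--         else:
--             parts.append(pending + c + ' ')
--             pending = ''
--     if pending:
--         parts.append(pending + 'x ')
--     return ''.join(parts)
-- ===== Notes on version B (the rewrite author's own statement) =====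
-- stated objective: simpler
-- what changed: Replaces the indexed while-loop with lookahead and variable-step increment by one forward pass over the filtered letters keeping a single pending character, collecting the pairs in a list joined at the end.
import Mathlib
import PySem

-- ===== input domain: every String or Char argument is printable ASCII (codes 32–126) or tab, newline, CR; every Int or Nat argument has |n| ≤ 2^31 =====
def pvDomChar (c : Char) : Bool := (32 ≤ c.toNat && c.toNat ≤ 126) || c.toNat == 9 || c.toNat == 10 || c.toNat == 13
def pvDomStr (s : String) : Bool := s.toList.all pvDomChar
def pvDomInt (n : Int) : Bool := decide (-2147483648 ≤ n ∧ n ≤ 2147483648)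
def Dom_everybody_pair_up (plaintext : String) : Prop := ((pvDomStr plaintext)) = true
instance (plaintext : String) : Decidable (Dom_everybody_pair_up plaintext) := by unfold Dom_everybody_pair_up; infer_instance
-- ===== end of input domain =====

-- B replaces A's indexed while-loop with lookahead by a single pass keeping a pending character (simpler).

-- ===== PORT A =====
-- A's formatting loop: keep only the alphabetic characters (string += in a loop → foldl appending).
def pvFilterLoopA (cs : List Char) : List Char :=
  cs.foldl (fun acc c => if PySem.Chars.isalpha c then acc ++ [c] else acc) []

-- A's while-loop: ch1 = textAlpha[i], ch2 = lookahead or 'x'; i advances by 1 on equal pair, else 2.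
def pvPairLoopA : List Char → List Char
  | [] => []
  | [c1] =>
      -- lookahead out of range: ch2 = 'x'; if ch1 = ch2 then ch2 := 'x' and i += 1 else i += 2
      if c1 = 'x' then [c1, 'x', ' '] ++ pvPairLoopA [] else [c1, 'x', ' '] ++ pvPairLoopA []
  | c1 :: c2 :: rest =>
      if c1 = c2 then [c1, 'x', ' '] ++ pvPairLoopA (c2 :: rest)
      else [c1, c2, ' '] ++ pvPairLoopA rest

def everybody_pair_up (plaintext : String) : String :=
  String.mk (pvPairLoopA (pvFilterLoopA (PySem.Str.lower plaintext).toList))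

-- ===== PORT B =====
-- B's single pass with a pending character; the emitted pieces are concatenated at the end.
def pvPairLoopB : Option Char → List Char → List Char
  | none, [] => []
  | some p, [] => [p, 'x', ' ']
  | none, c :: rest => pvPairLoopB (some c) rest
  | some p, c :: rest =>
      if c = p then [p, 'x', ' '] ++ pvPairLoopB (some c) rest
      else [p, c, ' '] ++ pvPairLoopB none rest

def everybody_pair_up_alt (plaintext : String) : String :=
  String.mk (pvPairLoopB none ((PySem.Str.lower plaintext).toList.filter PySem.Chars.isalpha))

-- ===== PRECONDITION & SPEC =====
def Spec_everybody_pair_up (plaintext : String) (out : String) : Prop := out = everybody_pair_up_alt plaintext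
instance (plaintext : String) (out : String) : Decidable (Spec_everybody_pair_up plaintext out) := by unfold Spec_everybody_pair_up; infer_instance

-- ===== CLAIM (what is proved, stated in full; the proofs are below) =====
def Claim_equal_everybody_pair_up : Prop := ∀ (plaintext : String), Dom_everybody_pair_up plaintext → Spec_everybody_pair_up plaintext (everybody_pair_up plaintext)

-- ===== LEMMAS AND PROOFS =====

-- A's character-appending fold builds exactly the filtered list.
theorem pvFilterLoopA_eq_filter (cs : List Char) :
    pvFilterLoopA cs = cs.filter PySem.Chars.isalpha := by
  have h : ∀ (l : List Char) (acc : List Char),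
      l.foldl (fun acc c => if PySem.Chars.isalpha c then acc ++ [c] else acc) acc
        = acc ++ l.filter PySem.Chars.isalpha := by
    intro l
    induction l with
    | nil => intro acc; simp
    | cons c t ih =>
      intro acc
      simp only [List.foldl_cons, List.filter_cons, ih]
      split <;> simp
  simpa using h cs []

-- B's pass with pending = p computes what A's loop computes on p :: l.
theorem pvPairLoopB_some (n : Nat) :
    ∀ (l : List Char), l.length ≤ n → ∀ (p : Char),
      pvPairLoopB (some p) l = pvPairLoopA (p :: l) := by
  induction n with
  | zero =>
    intro l hl p
    have : l = [] := List.eq_nil_of_length_eq_zero (Nat.le_zero.mp hl)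
    subst this
    simp [pvPairLoopB, pvPairLoopA]
  | succ n ih =>
    intro l hl p
    cases l with
    | nil => simp [pvPairLoopB, pvPairLoopA]
    | cons c rest =>
      simp only [pvPairLoopB, pvPairLoopA]
      by_cases hpc : p = c
      · subst hpc
        rw [ih rest (by simpa using Nat.le_of_succ_le_succ hl) p]
        simp
      · rw [if_neg (fun h => hpc h.symm), if_neg hpc]
        congr 1
        cases rest with
        | nil => simp [pvPairLoopB, pvPairLoopA]
        | cons c' r' =>
          simp only [pvPairLoopB]
          exact ih r' (by simp at hl; omega) c'

theorem pvPairLoopB_none (l : List Char) : pvPairLoopB none l = pvPairLoopA l := by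
  cases l with
  | nil => rfl
  | cons c rest =>
    simp only [pvPairLoopB]
    exact pvPairLoopB_some rest.length rest le_rfl c

-- ===== VERDICT (by name: the statement is the Claim_ definition above) =====
theorem everybody_pair_up_spec : Claim_equal_everybody_pair_up := by
  intro plaintext _
  unfold Spec_everybody_pair_up everybody_pair_up everybody_pair_up_alt
  rw [pvFilterLoopA_eq_filter, pvPairLoopB_none]
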